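-- pv_equiv track=rewrite | github.com/DanielMontoyaR/Systolic_Array_BrightnessFilter | Python/ArregloSistolico.py | agregar_padding
-- ===== SOURCE A (Python) =====
-- def agregar_padding(imagen, padding=2):
--     filas = len(imagen)
--     columnas = len(imagen[0])
--     nueva_fila = [0] * (columnas + 2 * padding)
--     imagen_padding = []
--
--     # Agregar filas de ceros arriba
--     for _ in range(padding):
--         imagen_padding.append(nueva_fila[:])
--
--     # Agregar ceros a los lados de cada fila original
--     for fila in imagen:
--         imagen_padding.append([0] * padding + fila + [0] * padding)
--
--     # Agregar filas de ceros abajo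
--     for _ in range(padding):
--         imagen_padding.append(nueva_fila[:])
--
--     return imagen_padding
-- ===== SOURCE B (Python) =====
-- def agregar_padding(imagen, padding=2):
--     # Coordinate-driven single pass: decide copy-vs-zero per output cell.
--     p = padding if padding > 0 else 0
--     filas = len(imagen)
--     cols0 = len(imagen[0])
--     out = []
--     for i in range(filas + 2 * p):
--         if p <= i < p + filas:
--             fila = imagen[i - p]
--             out.append([fila[j - p] if p <= j < p + len(fila) else 0
--                         for j in range(len(fila) + 2 * p)])
--         else:
--             out.append([0] * (cols0 + 2 * p))
--     return out
-- ===== Notes on version B (the rewrite author's own statement) =====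
-- stated objective: alternative
-- what changed: Replaces A's three concatenation loops (top zero rows, side-padded middle rows, bottom zero rows) with a single coordinate-driven pass over every output cell that decides copy-vs-zero by index arithmetic.
import Mathlib
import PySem

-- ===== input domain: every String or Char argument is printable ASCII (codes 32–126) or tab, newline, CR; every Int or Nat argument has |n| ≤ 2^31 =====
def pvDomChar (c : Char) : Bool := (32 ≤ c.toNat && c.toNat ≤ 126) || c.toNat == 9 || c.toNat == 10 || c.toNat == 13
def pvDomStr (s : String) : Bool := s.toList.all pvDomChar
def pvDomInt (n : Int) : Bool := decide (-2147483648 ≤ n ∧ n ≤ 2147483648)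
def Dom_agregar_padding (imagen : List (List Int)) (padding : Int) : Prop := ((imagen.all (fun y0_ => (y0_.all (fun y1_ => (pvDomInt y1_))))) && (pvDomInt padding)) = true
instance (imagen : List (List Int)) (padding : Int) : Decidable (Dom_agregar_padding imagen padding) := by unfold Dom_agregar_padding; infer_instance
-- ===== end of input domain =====

-- B rebuilds the padded image in one coordinate-driven pass (copy-vs-zero per output cell)
-- instead of A's three concatenation loops; alternative decomposition, same cost.


-- ===== PORT A =====
def agregar_padding (imagen : List (List Int)) (padding : Int) : List (List Int) :=
  let columnas : Int := PySem.List.len (PySem.List.pyGetD imagen 0 [])  -- imagen[0]; Pre_ excludes imagen = []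
  let nueva_fila : List Int := List.replicate (columnas + 2 * padding).toNat 0
  let top : List (List Int) := (PySem.List.pyRange 0 padding 1).map (fun _ => nueva_fila)
  let side : List Int := List.replicate padding.toNat 0
  top ++ imagen.map (fun fila => side ++ fila ++ side) ++ top

-- ===== PORT B =====
def agregar_padding_alt (imagen : List (List Int)) (padding : Int) : List (List Int) :=
  let p : Int := if padding > 0 then padding else 0
  let filas : Int := PySem.List.len imagen
  let cols0 : Int := PySem.List.len (PySem.List.pyGetD imagen 0 [])  -- imagen[0]; Pre_ excludes imagen = []
  (PySem.List.pyRange 0 (filas + 2 * p) 1).map (fun i =>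
    if p ≤ i ∧ i < p + filas then
      let fila := PySem.List.pyGetD imagen (i - p) []
      (PySem.List.pyRange 0 (PySem.List.len fila + 2 * p) 1).map (fun j =>
        if p ≤ j ∧ j < p + PySem.List.len fila then PySem.List.pyGetD fila (j - p) 0 else 0)
    else List.replicate (cols0 + 2 * p).toNat 0)

-- ===== PRECONDITION & SPEC =====
-- Pre_ excludes only the empty image, on which A raises IndexError at imagen[0].
def Pre_agregar_padding (imagen : List (List Int)) (padding : Int) : Prop := imagen ≠ []
instance (imagen : List (List Int)) (padding : Int) : Decidable (Pre_agregar_padding imagen padding) := by unfold Pre_agregar_padding; infer_instance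
def pvWitness_agregar_padding : List (List Int) × Int := ([[1, 2], [3]], 1)

def Spec_agregar_padding (imagen : List (List Int)) (padding : Int) (out : List (List Int)) : Prop := out = agregar_padding_alt imagen padding
instance (imagen : List (List Int)) (padding : Int) (out : List (List Int)) : Decidable (Spec_agregar_padding imagen padding out) := by unfold Spec_agregar_padding; infer_instance

-- ===== CLAIM (what is proved, stated in full; the proofs are below) =====
def Claim_equal_agregar_padding : Prop := ∀ (imagen : List (List Int)) (padding : Int), Dom_agregar_padding imagen padding → Pre_agregar_padding imagen padding → Spec_agregar_padding imagen padding (agregar_padding imagen padding)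

-- ===== LEMMAS AND PROOFS =====

-- indexing a list by all positions in order rebuilds the list (with any map on top)
lemma map_getD_range {α β : Type} (f : α → β) (xs : List α) (d : α) :
    (List.range xs.length).map (fun k => f (xs.getD k d)) = xs.map f := by
  induction xs with
  | nil => simp
  | cons x xs ih =>
      simp only [List.getD_eq_getElem?_getD] at ih ⊢
      simp only [List.length_cons, List.range_succ_eq_map, List.map_cons, List.map_map,
        Function.comp_def, List.getElem?_cons_zero, Option.getD_some, List.getElem?_cons_succ,
        List.map_cons]
      exact congrArg _ ih

-- a map that is constant on a range collapses to replicate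
lemma map_const_pyRange {γ : Type} (a b : Int) (g : Int → γ) (c : γ)
    (hg : ∀ i ∈ PySem.List.pyRange a b 1, g i = c) :
    (PySem.List.pyRange a b 1).map g = List.replicate (b - a).toNat c := by
  rw [List.map_congr_left hg, List.map_const', PySem.List.length_pyRange_one a b]

-- a map over a shifted index range of a list rebuilds the list (with any map on top)
lemma map_shift_pyRange {α β : Type} (p : Int) (xs : List α) (d : α) (h : α → β) :
    (PySem.List.pyRange p (p + (xs.length : Int)) 1).map
        (fun i => h (PySem.List.pyGetD xs (i - p) d)) = xs.map h := by
  rw [PySem.List.pyRange_one p (p + (xs.length : Int))]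
  have hlen : (p + (xs.length : Int) - p).toNat = xs.length := by omega
  rw [hlen, List.map_map, ← map_getD_range h xs d]
  apply List.map_congr_left
  intro k hk
  have h1 : p + (k : Int) - p = (k : Int) := by omega
  simp [h1]

-- one output row of B equals A's side-padded row
lemma rowB (p : Int) (hp : 0 ≤ p) (fila : List Int) :
    (PySem.List.pyRange 0 (PySem.List.len fila + 2 * p) 1).map (fun j =>
        if p ≤ j ∧ j < p + PySem.List.len fila then PySem.List.pyGetD fila (j - p) 0 else 0) =
    List.replicate p.toNat 0 ++ fila ++ List.replicate p.toNat 0 := by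
  have hL : PySem.List.len fila = (fila.length : Int) := by simp
  rw [hL,
    PySem.List.pyRange_one_append 0 p ((fila.length : Int) + 2 * p) hp (by omega),
    PySem.List.pyRange_one_append p (p + (fila.length : Int)) ((fila.length : Int) + 2 * p)
      (by omega) (by omega),
    List.map_append, List.map_append, ← List.append_assoc]
  congr 1
  congr 1
  · rw [map_const_pyRange 0 p _ 0 (fun i hi => by
      rw [PySem.List.mem_pyRange_one] at hi
      simp [show ¬ (p ≤ i ∧ i < p + (fila.length : Int)) by omega])]
    congr 1; omega
  · have hcongr : ∀ j ∈ PySem.List.pyRange p (p + (fila.length : Int)) 1,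
        (if p ≤ j ∧ j < p + (fila.length : Int) then PySem.List.pyGetD fila (j - p) 0 else 0) =
        id (PySem.List.pyGetD fila (j - p) 0) := by
      intro j hj
      rw [PySem.List.mem_pyRange_one] at hj
      simp [show p ≤ j ∧ j < p + (fila.length : Int) by omega]
    rw [List.map_congr_left hcongr, map_shift_pyRange p fila 0 id, List.map_id]
  · rw [map_const_pyRange (p + (fila.length : Int)) ((fila.length : Int) + 2 * p) _ 0
      (fun i hi => by
        rw [PySem.List.mem_pyRange_one] at hi
        simp [show ¬ (p ≤ i ∧ i < p + (fila.length : Int)) by omega])]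
    congr 1; omega

-- B in A's three-segment normal form, for any nonnegative p
lemma altB (imagen : List (List Int)) (p : Int) (hp : 0 ≤ p) :
    (PySem.List.pyRange 0 ((PySem.List.len imagen) + 2 * p) 1).map (fun i =>
      if p ≤ i ∧ i < p + PySem.List.len imagen then
        (PySem.List.pyRange 0 (PySem.List.len (PySem.List.pyGetD imagen (i - p) []) + 2 * p) 1).map
          (fun j => if p ≤ j ∧ j < p + PySem.List.len (PySem.List.pyGetD imagen (i - p) []) then
              PySem.List.pyGetD (PySem.List.pyGetD imagen (i - p) []) (j - p) 0 else 0)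
      else List.replicate (PySem.List.len (PySem.List.pyGetD imagen 0 []) + 2 * p).toNat 0) =
    List.replicate p.toNat (List.replicate (PySem.List.len (PySem.List.pyGetD imagen 0 []) + 2 * p).toNat 0)
      ++ imagen.map (fun fila => List.replicate p.toNat 0 ++ fila ++ List.replicate p.toNat 0)
      ++ List.replicate p.toNat (List.replicate (PySem.List.len (PySem.List.pyGetD imagen 0 []) + 2 * p).toNat 0) := by
  have hL : PySem.List.len imagen = (imagen.length : Int) := by simp
  rw [hL,
    PySem.List.pyRange_one_append 0 p ((imagen.length : Int) + 2 * p) hp (by omega),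
    PySem.List.pyRange_one_append p (p + (imagen.length : Int)) ((imagen.length : Int) + 2 * p)
      (by omega) (by omega),
    List.map_append, List.map_append, ← List.append_assoc]
  congr 1
  congr 1
  · rw [map_const_pyRange 0 p _ (List.replicate (PySem.List.len (PySem.List.pyGetD imagen 0 []) + 2 * p).toNat 0) (fun i hi => by
      rw [PySem.List.mem_pyRange_one] at hi
      simp [show ¬ (p ≤ i ∧ i < p + (imagen.length : Int)) by omega])]
    congr 1; omega
  · have hcongr : ∀ i ∈ PySem.List.pyRange p (p + (imagen.length : Int)) 1,
        (if p ≤ i ∧ i < p + (imagen.length : Int) then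
          (PySem.List.pyRange 0 (PySem.List.len (PySem.List.pyGetD imagen (i - p) []) + 2 * p) 1).map
            (fun j => if p ≤ j ∧ j < p + PySem.List.len (PySem.List.pyGetD imagen (i - p) []) then
                PySem.List.pyGetD (PySem.List.pyGetD imagen (i - p) []) (j - p) 0 else 0)
        else List.replicate (PySem.List.len (PySem.List.pyGetD imagen 0 []) + 2 * p).toNat 0) =
        (fun fila => List.replicate p.toNat 0 ++ fila ++ List.replicate p.toNat 0)
          (PySem.List.pyGetD imagen (i - p) []) := by
      intro i hi
      rw [PySem.List.mem_pyRange_one] at hi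
      rw [if_pos (by omega), rowB p hp]
    rw [List.map_congr_left hcongr]
    exact map_shift_pyRange p imagen []
      (fun fila => List.replicate p.toNat 0 ++ fila ++ List.replicate p.toNat 0)
  · rw [map_const_pyRange (p + (imagen.length : Int)) ((imagen.length : Int) + 2 * p) _ (List.replicate (PySem.List.len (PySem.List.pyGetD imagen 0 []) + 2 * p).toNat 0)
      (fun i hi => by
        rw [PySem.List.mem_pyRange_one] at hi
        simp [show ¬ (p ≤ i ∧ i < p + (imagen.length : Int)) by omega])]
    congr 1; omega

-- ===== VERDICT (by name: the statement is the Claim_ definition above) =====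
theorem agregar_padding_spec : Claim_equal_agregar_padding := by
  intro imagen padding _ _
  unfold Spec_agregar_padding agregar_padding agregar_padding_alt
  by_cases hpad : padding > 0
  · simp only [if_pos hpad]
    rw [altB imagen padding (le_of_lt hpad),
      map_const_pyRange 0 padding _ _ (fun i _ => rfl), Int.sub_zero]
  · simp only [if_neg hpad]
    rw [altB imagen 0 le_rfl]
    rw [map_const_pyRange 0 padding _ _ (fun i _ => rfl)]
    have h0 : padding.toNat = 0 := by omega
    simp [h0, show (padding - 0).toNat = 0 by omega]
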